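-- pv_equiv track=rewrite | github.com/NemoDarjeeling/Fintech512 | week3/kwic_peer.py | data_store
-- ===== SOURCE A (Python) =====
-- def data_store(input):
--     list1 = []
--     list2 = []
--     state = 0
--     for line in input:
--         if line != "::" and state == 0:
--             list1.append(line)
--         if line == "::":
--             state = 1
--             continue
--         if state == 1:
--             list2.append(line)
--
--     return (list1, list2)
-- ===== SOURCE B (Python) =====
-- def data_store(input):
--     lines = list(input)
--     if "::" in lines:
--         i = lines.index("::")
--         return (lines[:i], [l for l in lines[i+1:] if l != "::"])
--     return (lines, [])
-- ===== Notes on version B (the rewrite author's own statement) =====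
-- stated objective: simpler
-- what changed: Replaced the one-pass 0/1 state machine with a locate-the-first-'::'-then-slice decomposition: list1 = lines before it, list2 = lines after it filtered of further '::' lines.
import Mathlib
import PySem

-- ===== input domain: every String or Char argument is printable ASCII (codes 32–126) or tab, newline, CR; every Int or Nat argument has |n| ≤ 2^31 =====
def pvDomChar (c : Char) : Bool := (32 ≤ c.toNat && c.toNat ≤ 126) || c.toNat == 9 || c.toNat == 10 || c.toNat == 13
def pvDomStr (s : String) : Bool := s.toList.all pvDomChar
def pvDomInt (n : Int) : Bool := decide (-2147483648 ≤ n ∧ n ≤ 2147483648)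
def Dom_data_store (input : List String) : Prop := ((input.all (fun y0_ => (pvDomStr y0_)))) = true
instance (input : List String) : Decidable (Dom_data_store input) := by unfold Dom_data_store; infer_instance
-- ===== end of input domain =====

-- B replaces A's one-pass 0/1 state machine by locating the first "::" and slicing/filtering; objective: simpler.

-- ===== PORT A =====
-- the for-loop over `input` carrying (list1, list2, state), branches in source order
def data_store_loop (rest list1 list2 : List String) (state : Nat) : List String × List String :=
  match rest with
  | [] => (list1, list2)
  | line :: rest =>
    let list1 := if line ≠ "::" ∧ state = 0 then list1 ++ [line] else list1
    if line = "::" then data_store_loop rest list1 list2 1    -- state = 1; continue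
    else if state = 1 then data_store_loop rest list1 (list2 ++ [line]) state
    else data_store_loop rest list1 list2 state

def data_store (input : List String) : List String × List String :=
  data_store_loop input [] [] 0

-- ===== PORT B =====
-- lines[:i] / lines[i+1:] with i = index of "::" (a Nat, in range), exact as take/drop
def data_store_alt (input : List String) : List String × List String :=
  match PySem.List.index? input "::" with
  | some i => (input.take i, (input.drop (i + 1)).filter (fun l => l ≠ "::"))
  | none => (input, [])

-- ===== PRECONDITION & SPEC =====
def Spec_data_store (input : List String) (out : List String × List String) : Prop := out = data_store_alt input
instance (input : List String) (out : List String × List String) : Decidable (Spec_data_store input out) := by unfold Spec_data_store; infer_instance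

-- ===== CLAIM (what is proved, stated in full; the proofs are below) =====
def Claim_equal_data_store : Prop := ∀ (input : List String), Dom_data_store input → Spec_data_store input (data_store input)

-- ===== LEMMAS AND PROOFS =====

-- in state 1 the loop only appends the non-"::" lines to list2
theorem data_store_loop_state1 (rest list1 list2 : List String) :
    data_store_loop rest list1 list2 1 = (list1, list2 ++ rest.filter (fun l => l ≠ "::")) := by
  induction rest generalizing list2 with
  | nil => simp [data_store_loop]
  | cons line rest ih =>
    by_cases h : line = "::" <;>
      simp [data_store_loop, h, ih]

-- in state 0 the loop computes exactly B's locate-and-slice result, prefixed by the accumulators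
theorem data_store_loop_state0 (rest list1 list2 : List String) :
    data_store_loop rest list1 list2 0 =
      match PySem.List.index? rest "::" with
      | some i => (list1 ++ rest.take i, list2 ++ (rest.drop (i + 1)).filter (fun l => l ≠ "::"))
      | none => (list1 ++ rest, list2) := by
  induction rest generalizing list1 list2 with
  | nil => simp [data_store_loop, PySem.List.index?]
  | cons line rest ih =>
    by_cases h : line = "::"
    · subst h
      rw [PySem.List.index?_cons_self]
      simp [data_store_loop, data_store_loop_state1]
    · rw [PySem.List.index?_cons_of_ne rest h]
      simp only [data_store_loop]
      rw [if_pos (⟨h, trivial⟩ : line ≠ "::" ∧ True), if_neg h,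
        if_neg (by omega : ¬ (0 : Nat) = 1), ih]
      cases hidx : PySem.List.index? rest "::" with
      | none => simp
      | some i => simp [List.take_succ_cons, List.drop_succ_cons]

-- ===== VERDICT (by name: the statement is the Claim_ definition above) =====
theorem data_store_spec : Claim_equal_data_store := by
  intro input _
  unfold Spec_data_store data_store data_store_alt
  rw [data_store_loop_state0]
  cases PySem.List.index? input "::" <;> simp
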